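-- pv_equiv track=rewrite | github.com/STARC00KIE/bootcamp | codingtest_study/stack_queue/3. 연속된 문자 지우기.py | solution
-- ===== SOURCE A (Python) =====
-- def solution(s):
--     stack = []
--
--     for char in s:
--         if stack and stack[-1] == char:
--             stack.pop()
--         else:
--             stack.append(char)
--
--     answer = "".join(stack)
--     return answer
-- ===== SOURCE B (Python) =====
-- def solution(s):
--     # Repeatedly delete the first adjacent equal pair until none remains (fixed point).
--     while True:
--         for i in range(len(s) - 1):
--             if s[i] == s[i + 1]:
--                 s = s[:i] + s[i + 2:]
--                 break
--         else:
--             return s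
-- ===== Notes on version B (the rewrite author's own statement) =====
-- stated objective: alternative
-- what changed: Replaces the single left-to-right stack pass with repeated scan-and-delete of the first adjacent equal pair until a fixed point is reached (equal by confluence of adjacent-pair deletion).
import Mathlib
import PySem

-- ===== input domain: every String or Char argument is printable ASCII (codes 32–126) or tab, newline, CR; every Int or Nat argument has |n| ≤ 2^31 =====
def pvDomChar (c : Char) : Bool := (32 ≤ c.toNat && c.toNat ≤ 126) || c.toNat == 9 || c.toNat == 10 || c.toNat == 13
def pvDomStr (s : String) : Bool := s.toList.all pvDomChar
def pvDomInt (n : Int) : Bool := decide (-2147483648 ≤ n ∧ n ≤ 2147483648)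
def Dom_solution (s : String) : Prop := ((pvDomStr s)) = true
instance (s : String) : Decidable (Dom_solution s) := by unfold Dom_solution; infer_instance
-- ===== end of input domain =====

-- B replaces A's one stack pass by repeated deletion of the first adjacent equal
-- pair to a fixed point (objective: alternative algorithm, same result).

-- ===== PORT A =====
-- Python stack with append/pop at the end, ported as a cons list with its top at
-- the head (so stack[-1] = head, pop = tail, append = cons); joined via reverse.
def pvStep (st : List Char) (c : Char) : List Char :=
  match st with
  | h :: t => if h = c then t else c :: h :: t
  | [] => [c]

def solution (s : String) : String :=
  String.ofList ((s.toList.foldl pvStep []).reverse)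

-- ===== PORT B =====
-- the inner for-loop: delete the first adjacent equal pair, none if there is none
def pvRemovePair : List Char → Option (List Char)
  | a :: b :: t => if a = b then some t else (pvRemovePair (b :: t)).map (a :: ·)
  | _ => none

theorem pvRemovePair_length : ∀ {l l' : List Char},
    pvRemovePair l = some l' → l'.length + 2 = l.length := by
  intro l
  induction l with
  | nil => intro l' h; simp [pvRemovePair] at h
  | cons a t ih =>
    intro l' h
    match t, h with
    | b :: t, h =>
      simp only [pvRemovePair] at h
      split at h
      · cases h; simp
      · simp only [Option.map_eq_some_iff] at h
        obtain ⟨l'', h1, rfl⟩ := h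
        simpa using ih h1

-- the outer while-loop: repeat until no adjacent equal pair remains
def pvFix (l : List Char) : List Char :=
  match h : pvRemovePair l with
  | some l' => pvFix l'
  | none => l
termination_by l.length
decreasing_by have := pvRemovePair_length h; omega

def solution_alt (s : String) : String := String.ofList (pvFix s.toList)

-- ===== PRECONDITION & SPEC =====
def Spec_solution (s : String) (out : String) : Prop := out = solution_alt s
instance (s : String) (out : String) : Decidable (Spec_solution s out) := by unfold Spec_solution; infer_instance

-- ===== CLAIM (what is proved, stated in full; the proofs are below) =====
def Claim_equal_solution : Prop := ∀ (s : String), Dom_solution s → Spec_solution s (solution s)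

-- ===== LEMMAS AND PROOFS =====

-- the stack never carries two equal adjacent elements
theorem pvStep_chain {st : List Char} {c : Char} (h : st.IsChain (· ≠ ·)) :
    (pvStep st c).IsChain (· ≠ ·) := by
  match st with
  | [] => simp [pvStep]
  | h' :: t =>
    simp only [pvStep]
    split
    · exact h.tail
    · rename_i hne
      exact List.isChain_cons_cons.mpr ⟨Ne.symm hne, h⟩

-- processing two equal characters in a row leaves a duplicate-free stack unchanged
theorem pvStep_twice {st : List Char} {c : Char} (h : st.IsChain (· ≠ ·)) :
    pvStep (pvStep st c) c = st := by
  match st with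
  | [] => simp [pvStep]
  | h' :: t =>
    simp only [pvStep]
    by_cases hc : h' = c
    · simp only [if_pos hc]
      match t with
      | [] => simp [hc]
      | x :: t' =>
        have hx : h' ≠ x := (List.isChain_cons_cons.mp h).1
        subst hc
        simp [if_neg (Ne.symm hx)]
    · simp [pvStep, hc]

theorem pvFold_chain (l : List Char) {st : List Char} (h : st.IsChain (· ≠ ·)) :
    (l.foldl pvStep st).IsChain (· ≠ ·) := by
  induction l generalizing st with
  | nil => simpa
  | cons c l ih => exact ih (pvStep_chain h)

-- deleting an adjacent equal pair does not change the stack fold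
theorem pvFold_pair (u v : List Char) (c : Char) :
    (u ++ c :: c :: v).foldl pvStep [] = (u ++ v).foldl pvStep [] := by
  have hchain : (u.foldl pvStep ([] : List Char)).IsChain (· ≠ ·) :=
    pvFold_chain u (by simp)
  simp only [List.foldl_append, List.foldl_cons]
  rw [pvStep_twice hchain]

-- pvRemovePair = some: the input splits around an adjacent equal pair
theorem pvRemovePair_split : ∀ {l l' : List Char}, pvRemovePair l = some l' →
    ∃ u c v, l = u ++ c :: c :: v ∧ l' = u ++ v := by
  intro l
  induction l with
  | nil => intro l' h; simp [pvRemovePair] at h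
  | cons a t ih =>
    intro l' h
    match t, h with
    | b :: t, h =>
      simp only [pvRemovePair] at h
      split at h
      · rename_i hab
        have ht := Option.some.inj h
        exact ⟨[], a, t, by simp [hab], by simpa using ht.symm⟩
      · simp only [Option.map_eq_some_iff] at h
        obtain ⟨l'', h1, rfl⟩ := h
        obtain ⟨u, c, v, h2, h3⟩ := ih h1
        exact ⟨a :: u, c, v, by simp [h2], by simp [h3]⟩

-- pvRemovePair = none: no adjacent equal pair
theorem pvRemovePair_none : ∀ {l : List Char},
    pvRemovePair l = none → l.IsChain (· ≠ ·) := by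
  intro l
  induction l with
  | nil => intro _; simp
  | cons a t ih =>
    intro h
    match t, h with
    | [], _ => simp
    | b :: t, h =>
      simp only [pvRemovePair] at h
      split at h
      · simp at h
      · rename_i hab
        simp only [Option.map_eq_none_iff] at h
        exact List.isChain_cons_cons.mpr ⟨hab, ih h⟩

-- the stack pass on a string without adjacent equal pairs pushes everything
theorem pvFold_of_chain : ∀ (l st : List Char), st.IsChain (· ≠ ·) →
    l.IsChain (· ≠ ·) → (∀ a ∈ l.head?, ∀ b ∈ st.head?, a ≠ b) →
    l.foldl pvStep st = l.reverse ++ st := by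
  intro l
  induction l with
  | nil => intro st _ _ _; simp
  | cons c l ih =>
    intro st hst hl hhd
    have hpush : pvStep st c = c :: st := by
      match st with
      | [] => simp [pvStep]
      | h' :: t =>
        have : c ≠ h' := hhd c (by simp) h' (by simp)
        simp [pvStep, if_neg (Ne.symm this)]
    rw [List.foldl_cons, hpush,
      ih (c :: st)
        ((List.isChain_cons.mpr ⟨fun b hb => hhd c (by simp) b hb, hst⟩))
        hl.tail
        (by
          intro a ha b hb
          simp at hb
          subst hb
          exact Ne.symm (hl.rel_head? ha))]
    simp

-- main invariant: the fixed point of pair deletion, reversed, is the stack fold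
theorem pvFix_rev : ∀ (l : List Char), (pvFix l).reverse = l.foldl pvStep [] := by
  intro l
  induction hn : l.length using Nat.strong_induction_on generalizing l with
  | _ n ih =>
    unfold pvFix
    cases h : pvRemovePair l with
    | none =>
      have := pvRemovePair_none h
      rw [pvFold_of_chain l [] (by simp) this (by simp)]
      simp
    | some l' =>
      have hlen := pvRemovePair_length h
      obtain ⟨u, c, v, rfl, rfl⟩ := pvRemovePair_split h
      subst hn
      rw [ih (u ++ v).length (by omega) (u ++ v) rfl, pvFold_pair]

-- ===== VERDICT (by name: the statement is the Claim_ definition above) =====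
theorem solution_spec : Claim_equal_solution := by
  intro s _
  unfold Spec_solution solution solution_alt
  rw [← pvFix_rev, List.reverse_reverse]
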